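-- pv_equiv track=rewrite | github.com/GabbyTab/boofun | src/boolfunc/analysis/block_sensitivity.py | _max_disjoint
-- ===== SOURCE A (Python) =====
-- from typing import List
--
-- def _max_disjoint(blocks: List[int], start: int, used: int) -> int:
--     best = 0
--     for idx in range(start, len(blocks)):
--         b = blocks[idx]
--         if used & b:
--             continue
--         best = max(best, 1 + _max_disjoint(blocks, idx + 1, used | b))
--     return best
-- ===== SOURCE B (Python) =====
-- def _max_disjoint(blocks, start, used):
--     n = len(blocks)
--     memo = {}
--
--     def best(i, u):
--         key = (i, u)
--         if key in memo:
--             return memo[key]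
--         r = 0
--         for idx in range(i, n):
--             b = blocks[idx]
--             if u & b:
--                 continue
--             s = best(idx + 1, u | b)
--             if s + 1 > r:
--                 r = s + 1
--         memo[key] = r
--         return r
--
--     return best(start, used)
-- ===== Notes on version B (the rewrite author's own statement) =====
-- stated objective: alternative
-- what changed: Replaces A's plain recursive search (which recomputes identical (index, used-mask) subproblems over and over) by memoized dynamic programming on those states, each solved once via a dict keyed by (index, mask).
import Mathlib
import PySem

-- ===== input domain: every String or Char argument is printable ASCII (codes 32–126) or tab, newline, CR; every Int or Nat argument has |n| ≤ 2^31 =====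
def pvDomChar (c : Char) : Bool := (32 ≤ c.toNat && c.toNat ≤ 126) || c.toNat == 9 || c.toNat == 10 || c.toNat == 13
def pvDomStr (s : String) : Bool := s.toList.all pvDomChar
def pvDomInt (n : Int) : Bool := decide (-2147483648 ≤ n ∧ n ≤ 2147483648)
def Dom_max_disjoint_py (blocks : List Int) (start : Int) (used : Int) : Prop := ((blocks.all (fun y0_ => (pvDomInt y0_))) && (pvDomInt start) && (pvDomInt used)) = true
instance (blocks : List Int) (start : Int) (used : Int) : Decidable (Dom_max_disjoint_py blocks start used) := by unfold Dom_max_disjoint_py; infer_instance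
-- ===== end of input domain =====

-- B memoizes A's recursion on (index, used-mask) states so each subproblem is solved once (alternative implementation; same return value).

-- ===== PORT A =====
-- fuel-indexed transliteration of A's recursion; the wrapper passes fuel = number of
-- remaining indices, which is always sufficient (each recursive call moves start forward).
def pvALoop (blocks : List Int) : Nat → Int → Int → Int
  | 0, _, _ => 0
  | fuel+1, start, used =>
    (PySem.List.pyRange start blocks.length 1).foldl
      (fun best idx =>
        let b := (PySem.List.pyGet? blocks idx).getD 0
        if PySem.Int.band used b ≠ 0 then best
        else max best (1 + pvALoop blocks fuel (idx + 1) (PySem.Int.bor used b))) 0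

def max_disjoint_py (blocks : List Int) (start : Int) (used : Int) : Int :=
  pvALoop blocks ((blocks.length : Int) - start).toNat start used

-- ===== PORT B =====
-- B's memoized helper `best(i, u)`: the memo dict is threaded through explicitly;
-- fuel = number of remaining indices, always sufficient (each recursive call moves past idx).
def pvBBest (blocks : List Int) : Nat → Int → Int → PySem.Dict (Int × Int) Int → Int × PySem.Dict (Int × Int) Int
  | 0, _, _, memo => (0, memo)
  | fuel+1, i, u, memo =>
    match memo.get? (i, u) with
    | some v => (v, memo)
    | none =>
      let p := (PySem.List.pyRange i (blocks.length : Int) 1).foldl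
        (fun acc idx =>
          let b := (PySem.List.pyGet? blocks idx).getD 0
          if PySem.Int.band u b ≠ 0 then acc
          else
            let q := pvBBest blocks fuel (idx + 1) (PySem.Int.bor u b) acc.2
            (if q.1 + 1 > acc.1 then q.1 + 1 else acc.1, q.2)) ((0 : Int), memo)
      (p.1, p.2.insert (i, u) p.1)

def max_disjoint_py_alt (blocks : List Int) (start : Int) (used : Int) : Int :=
  (pvBBest blocks ((blocks.length : Int) - start).toNat start used PySem.Dict.empty).1

-- ===== PRECONDITION & SPEC =====
-- Pre_ excludes exactly the inputs where the Python A raises IndexError (blocks[idx]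
-- with idx < -len(blocks)); B raises there too.
def Pre_max_disjoint_py (blocks : List Int) (start : Int) (used : Int) : Prop :=
  -(blocks.length : Int) ≤ start
instance (blocks : List Int) (start : Int) (used : Int) : Decidable (Pre_max_disjoint_py blocks start used) := by unfold Pre_max_disjoint_py; infer_instance

def pvWitness_max_disjoint_py : List Int × Int × Int := ([1, 2, 3, 3], 0, 0)

def Spec_max_disjoint_py (blocks : List Int) (start : Int) (used : Int) (out : Int) : Prop := out = max_disjoint_py_alt blocks start used
instance (blocks : List Int) (start : Int) (used : Int) (out : Int) : Decidable (Spec_max_disjoint_py blocks start used out) := by unfold Spec_max_disjoint_py; infer_instance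

-- ===== CLAIM (what is proved, stated in full; the proofs are below) =====
def Claim_equal_max_disjoint_py : Prop := ∀ (blocks : List Int) (start : Int) (used : Int), Dom_max_disjoint_py blocks start used → Pre_max_disjoint_py blocks start used → Spec_max_disjoint_py blocks start used (max_disjoint_py blocks start used)

-- ===== LEMMAS AND PROOFS =====

-- proof-side reference function: the plain (unmemoized) skip/take recursion
def pvSpec (blocks : List Int) (i u : Int) : Int :=
  if _h : i < (blocks.length : Int) then
    if PySem.Int.band u ((PySem.List.pyGet? blocks i).getD 0) ≠ 0 then
      pvSpec blocks (i + 1) u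
    else
      max (pvSpec blocks (i + 1) u)
        (1 + pvSpec blocks (i + 1) (PySem.Int.bor u ((PySem.List.pyGet? blocks i).getD 0)))
  else 0
termination_by ((blocks.length : Int) - i).toNat
decreasing_by all_goals omega

theorem pvSpec_pos (blocks : List Int) (i u : Int) (hi : i < (blocks.length : Int)) :
    pvSpec blocks i u =
      if PySem.Int.band u ((PySem.List.pyGet? blocks i).getD 0) ≠ 0 then
        pvSpec blocks (i + 1) u
      else
        max (pvSpec blocks (i + 1) u)
          (1 + pvSpec blocks (i + 1) (PySem.Int.bor u ((PySem.List.pyGet? blocks i).getD 0))) := by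
  rw [pvSpec, dif_pos hi]

theorem pvSpec_neg (blocks : List Int) (i u : Int) (hi : ¬ i < (blocks.length : Int)) :
    pvSpec blocks i u = 0 := by
  rw [pvSpec, dif_neg hi]

theorem pvSpec_nonneg (blocks : List Int) (i u : Int) : 0 ≤ pvSpec blocks i u := by
  fun_induction pvSpec with
  | case1 i u h hc ih => exact ih
  | case2 i u h hc ih1 ih2 => simp only [le_max_iff]; left; exact ih1
  | case3 i u h => omega

-- extracting the accumulator out of a skip/max fold (the shape of A's loop body)
theorem pvFoldlExtract (c : Int → Prop) [DecidablePred c] (v : Int → Int)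
    (hv : ∀ x, 0 ≤ v x) :
    ∀ (l : List Int) (a : Int), 0 ≤ a →
      l.foldl (fun best x => if c x then best else max best (v x)) a
        = max a (l.foldl (fun best x => if c x then best else max best (v x)) 0) := by
  intro l
  induction l with
  | nil => intro a ha; simp [ha]
  | cons x l ih =>
    intro a ha
    by_cases hc : c x
    · simp only [List.foldl_cons, if_pos hc]
      exact ih a ha
    · simp only [List.foldl_cons, if_neg hc]
      rw [ih (max a (v x)) (le_trans ha (le_max_left _ _)),
          ih (max 0 (v x)) (le_max_left _ _),
          max_eq_right (hv x), max_assoc]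

-- A's loop body, with the recursive call replaced by the reference function,
-- folded over range(i, len(blocks)) computes pvSpec
theorem pvSpecFold (blocks : List Int) :
    ∀ (m : Nat) (i u : Int), (((blocks.length : Int) - i).toNat ≤ m) →
      (PySem.List.pyRange i (blocks.length : Int) 1).foldl
        (fun best idx =>
          if PySem.Int.band u ((PySem.List.pyGet? blocks idx).getD 0) ≠ 0 then best
          else max best (1 + pvSpec blocks (idx + 1) (PySem.Int.bor u ((PySem.List.pyGet? blocks idx).getD 0)))) 0
        = pvSpec blocks i u := by
  intro m
  induction m with
  | zero =>
    intro i u hm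
    have hi : (blocks.length : Int) ≤ i := by omega
    rw [PySem.List.pyRange_one_eq_nil hi, List.foldl_nil, pvSpec_neg blocks i u (by omega)]
  | succ m ih =>
    intro i u hm
    by_cases hi : i < (blocks.length : Int)
    · rw [PySem.List.pyRange_one_cons hi, List.foldl_cons, pvSpec_pos blocks i u hi]
      by_cases hc : PySem.Int.band u ((PySem.List.pyGet? blocks i).getD 0) ≠ 0
      · rw [if_pos hc, if_pos hc]
        exact ih (i + 1) u (by omega)
      · rw [if_neg hc, if_neg hc]
        have h1 : (0:Int) ≤ 1 + pvSpec blocks (i + 1) (PySem.Int.bor u ((PySem.List.pyGet? blocks i).getD 0)) := by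
          have := pvSpec_nonneg blocks (i + 1) (PySem.Int.bor u ((PySem.List.pyGet? blocks i).getD 0)); omega
        rw [max_eq_right h1,
            pvFoldlExtract (fun idx => PySem.Int.band u ((PySem.List.pyGet? blocks idx).getD 0) ≠ 0)
              (fun idx => 1 + pvSpec blocks (idx + 1) (PySem.Int.bor u ((PySem.List.pyGet? blocks idx).getD 0)))
              (fun idx => by
                show (0:Int) ≤ 1 + pvSpec blocks (idx + 1) (PySem.Int.bor u ((PySem.List.pyGet? blocks idx).getD 0))
                have := pvSpec_nonneg blocks (idx + 1) (PySem.Int.bor u ((PySem.List.pyGet? blocks idx).getD 0)); omega)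
              _ _ h1,
            ih (i + 1) u (by omega), max_comm]
    · rw [PySem.List.pyRange_one_eq_nil (by omega), List.foldl_nil, pvSpec_neg blocks i u hi]

-- A's port computes the reference function whenever its fuel is sufficient
theorem pvALoop_eq_spec (blocks : List Int) :
    ∀ (fuel : Nat) (i u : Int), (((blocks.length : Int) - i).toNat ≤ fuel) →
      pvALoop blocks fuel i u = pvSpec blocks i u := by
  intro fuel
  induction fuel with
  | zero =>
    intro i u hm
    rw [pvALoop, pvSpec_neg blocks i u (by omega)]
  | succ fuel ih =>
    intro i u hm
    rw [pvALoop]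
    rw [PySem.List.foldl_congr_mem' _ _
      (fun best idx =>
        if PySem.Int.band u ((PySem.List.pyGet? blocks idx).getD 0) ≠ 0 then best
        else max best (1 + pvSpec blocks (idx + 1) (PySem.Int.bor u ((PySem.List.pyGet? blocks idx).getD 0)))) 0
      (by
        intro idx hidx acc
        have hmem := (PySem.List.mem_pyRange_one.mp hidx)
        simp only
        rw [ih (idx + 1) (PySem.Int.bor u ((PySem.List.pyGet? blocks idx).getD 0)) (by omega)])]
    exact pvSpecFold blocks (fuel + 1) i u hm

-- a memo dict is valid when every entry records the reference value for its key
def pvValid (blocks : List Int) (memo : PySem.Dict (Int × Int) Int) : Prop :=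
  ∀ j w v, memo.get? (j, w) = some v → v = pvSpec blocks j w

-- B's memoized helper returns the reference value and preserves memo validity
theorem pvBBest_eq_spec (blocks : List Int) :
    ∀ (fuel : Nat) (i u : Int) (memo : PySem.Dict (Int × Int) Int),
      (((blocks.length : Int) - i).toNat ≤ fuel) → pvValid blocks memo →
      (pvBBest blocks fuel i u memo).1 = pvSpec blocks i u ∧
        pvValid blocks (pvBBest blocks fuel i u memo).2 := by
  intro fuel
  induction fuel with
  | zero =>
    intro i u memo hm hv
    rw [pvBBest, pvSpec_neg blocks i u (by omega)]
    exact ⟨rfl, hv⟩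
  | succ fuel ih =>
    intro i u memo hm hv
    rw [pvBBest]
    cases hget : memo.get? (i, u) with
    | some v =>
      simp only
      exact ⟨hv i u v hget, hv⟩
    | none =>
      simp only
      -- the loop: threading the memo through, the accumulator tracks A's loop value
      have key : ∀ (l : List Int), (∀ idx ∈ l, i ≤ idx) →
          ∀ (a : Int) (m : PySem.Dict (Int × Int) Int), pvValid blocks m →
            (l.foldl
              (fun acc idx =>
                if PySem.Int.band u ((PySem.List.pyGet? blocks idx).getD 0) ≠ 0 then acc
                else
                  ((if (pvBBest blocks fuel (idx + 1) (PySem.Int.bor u ((PySem.List.pyGet? blocks idx).getD 0)) acc.2).1 + 1 > acc.1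
                    then (pvBBest blocks fuel (idx + 1) (PySem.Int.bor u ((PySem.List.pyGet? blocks idx).getD 0)) acc.2).1 + 1
                    else acc.1),
                   (pvBBest blocks fuel (idx + 1) (PySem.Int.bor u ((PySem.List.pyGet? blocks idx).getD 0)) acc.2).2)) (a, m)).1
              = l.foldl
                  (fun best idx =>
                    if PySem.Int.band u ((PySem.List.pyGet? blocks idx).getD 0) ≠ 0 then best
                    else max best (1 + pvSpec blocks (idx + 1) (PySem.Int.bor u ((PySem.List.pyGet? blocks idx).getD 0)))) a
            ∧ pvValid blocks
                (l.foldl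
                  (fun acc idx =>
                    if PySem.Int.band u ((PySem.List.pyGet? blocks idx).getD 0) ≠ 0 then acc
                    else
                      ((if (pvBBest blocks fuel (idx + 1) (PySem.Int.bor u ((PySem.List.pyGet? blocks idx).getD 0)) acc.2).1 + 1 > acc.1
                        then (pvBBest blocks fuel (idx + 1) (PySem.Int.bor u ((PySem.List.pyGet? blocks idx).getD 0)) acc.2).1 + 1
                        else acc.1),
                       (pvBBest blocks fuel (idx + 1) (PySem.Int.bor u ((PySem.List.pyGet? blocks idx).getD 0)) acc.2).2)) (a, m)).2 := by
        intro l
        induction l with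
        | nil => intro _ a m hvm; exact ⟨rfl, hvm⟩
        | cons idx l ihl =>
          intro hmem a m hvm
          simp only [List.foldl_cons]
          by_cases hc : PySem.Int.band u ((PySem.List.pyGet? blocks idx).getD 0) ≠ 0
          · rw [if_pos hc, if_pos hc]
            exact ihl (fun x hx => hmem x (List.mem_cons_of_mem _ hx)) a m hvm
          · rw [if_neg hc, if_neg hc]
            have hidx : i ≤ idx := hmem idx List.mem_cons_self
            obtain ⟨hq1, hq2⟩ := ih (idx + 1) (PySem.Int.bor u ((PySem.List.pyGet? blocks idx).getD 0)) m (by omega) hvm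
            obtain ⟨h1, h2⟩ := ihl (fun x hx => hmem x (List.mem_cons_of_mem _ hx))
              (if (pvBBest blocks fuel (idx + 1) (PySem.Int.bor u ((PySem.List.pyGet? blocks idx).getD 0)) m).1 + 1 > a
               then (pvBBest blocks fuel (idx + 1) (PySem.Int.bor u ((PySem.List.pyGet? blocks idx).getD 0)) m).1 + 1
               else a)
              (pvBBest blocks fuel (idx + 1) (PySem.Int.bor u ((PySem.List.pyGet? blocks idx).getD 0)) m).2 hq2
            refine ⟨?_, h2⟩
            rw [h1, hq1]
            congr 1
            rw [max_def]
            split_ifs <;> omega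
      obtain ⟨h1, h2⟩ := key (PySem.List.pyRange i (blocks.length : Int) 1)
        (fun x hx => (PySem.List.mem_pyRange_one.mp hx).1) 0 memo hv
      have hfold := pvSpecFold blocks (((blocks.length : Int) - i).toNat) i u (le_refl _)
      constructor
      · rw [h1, hfold]
      · intro j w v hgetjw
        by_cases hkey : (j, w) = (i, u)
        · have hj : j = i := congrArg Prod.fst hkey
          have hu : w = u := congrArg Prod.snd hkey
          rw [hkey, PySem.Dict.get?_insert_self] at hgetjw
          rw [hj, hu, ← Option.some_inj.mp hgetjw, h1, hfold]
        · rw [PySem.Dict.get?_insert_of_ne _ _ hkey] at hgetjw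
          exact h2 j w v hgetjw

-- ===== VERDICT (by name: the statement is the Claim_ definition above) =====
theorem max_disjoint_py_spec : Claim_equal_max_disjoint_py := by
  intro blocks start used _ _
  unfold Spec_max_disjoint_py max_disjoint_py max_disjoint_py_alt
  rw [pvALoop_eq_spec blocks _ start used (by omega)]
  have h := pvBBest_eq_spec blocks (((blocks.length : Int) - start).toNat) start used
    PySem.Dict.empty (by omega)
    (by intro j w v hget; rw [PySem.Dict.get?_empty] at hget; exact absurd hget (by simp))
  exact h.1.symm
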